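-- pv_equiv track=rewrite | github.com/HumanOsv/2D-QSAR_Peptides | 02Smiles.py | split_seq_components
-- ===== SOURCE A (Python) =====
-- CT = ['+']
--
-- NT = ['&']
--
-- def split_seq_components(seq):
--     """split seq in generations and branching units
--         Arguments:
--             seq {string} -- dendrimer sequence
--
--         Returns:
--             lists -- generations(gs, from 0 to..), branching units, terminal and capping
--     """
--     g = []
--     gs = []
--     bs = []
--     t = []
--     c = []
--
--     for ix, i in enumerate(seq):
--         if i not in ['1', '2', '3', '4', '5', '6', '7', '8']:
--             if i in CT:
--                 t.append(i)
--             elif i in NT: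
--                 c.append(i)
--             elif i == 'X':
--                 continue
--             elif i == '-':
--                 if seq[ix - 1] in ['1', '2', '3', '4', '5', '6', '7', '8']:
--                     bs.append(i)
--                 else:
--                     g.append(i)
--             else:
--                 g.append(i)
--         else:
--             gs.append(g[::-1])
--             bs.append(i)
--             g = []
--
--     gs.append(g[::-1])
--     gs = gs[::-1]
--     bs = bs[::-1]
--
--     return gs, bs, t, c
-- ===== SOURCE B (Python) =====
-- CT = ['+']
--
-- NT = ['&']
--
-- def split_seq_components(seq):
--     """Single backward pass: builds gs and bs directly in their final order,
--     eliminating the [::-1] reversals of the original."""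
--     digits = ('1', '2', '3', '4', '5', '6', '7', '8')
--     g = []
--     gs = []
--     bs = []
--     t = []
--     c = []
--     for ix in range(len(seq) - 1, -1, -1):
--         i = seq[ix]
--         if i in digits:
--             gs.append(g)
--             g = []
--             bs.append(i)
--         elif i in CT:
--             t.insert(0, i)
--         elif i in NT:
--             c.insert(0, i)
--         elif i == 'X':
--             continue
--         elif i == '-' and seq[ix - 1] in digits:
--             bs.append(i)
--         else:
--             g.append(i)
--     gs.append(g)
--     return gs, bs, t, c
-- ===== Notes on version B (the rewrite author's own statement) =====
-- stated objective: alternative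
-- what changed: B scans the sequence in a single backward pass with explicit indices, emitting gs and bs directly in their final order and prepending to t and c, instead of A's forward enumerate pass followed by reversing gs, bs and every flushed group.
import Mathlib
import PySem

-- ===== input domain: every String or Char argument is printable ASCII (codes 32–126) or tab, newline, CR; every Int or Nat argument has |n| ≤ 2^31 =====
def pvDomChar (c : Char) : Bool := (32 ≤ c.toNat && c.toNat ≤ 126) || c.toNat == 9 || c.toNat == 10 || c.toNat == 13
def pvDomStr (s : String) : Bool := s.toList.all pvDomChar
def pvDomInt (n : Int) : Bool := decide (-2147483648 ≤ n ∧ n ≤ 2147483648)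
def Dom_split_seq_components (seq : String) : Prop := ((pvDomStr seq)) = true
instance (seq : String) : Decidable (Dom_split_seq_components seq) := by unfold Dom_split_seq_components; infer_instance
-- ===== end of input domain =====

-- B replaces A's forward pass plus three final [::-1] reversals by a single backward pass
-- that builds gs and bs directly in their final order (objective: alternative decomposition).

-- Shared context (both Python sources use the same module constants and state shape)
def pvCT : List Char := ['+']
def pvNT : List Char := ['&']
def pvDigits : List Char := ['1', '2', '3', '4', '5', '6', '7', '8']

structure PvSt where
  g : List String
  gs : List (List String)
  bs : List String
  t : List String
  c : List String
deriving Repr, DecidableEq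

-- the test `seq[ix - 1] in ['1', …, '8']` appearing verbatim in both sources
-- (pyGet? is `some` at every call site: the string is nonempty while iterating,
--  and ix - 1 = -1 wraps to the last character exactly as Python does)
def pvPrevDigit (l : List Char) (ix : Int) : Bool :=
  (PySem.List.pyGet? l (ix - 1)).any (fun ch => pvDigits.contains ch)

-- ===== PORT A =====
def pvAstep (l : List Char) (st : PvSt) (p : Int × Char) : PvSt :=
  let ix := p.1
  let i := p.2
  if i ∉ pvDigits then
    if i ∈ pvCT then { st with t := st.t ++ [i.toString] }
    else if i ∈ pvNT then { st with c := st.c ++ [i.toString] }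
    else if i = 'X' then st
    else if i = '-' then
      if pvPrevDigit l ix then { st with bs := st.bs ++ [i.toString] }
      else { st with g := st.g ++ [i.toString] }
    else { st with g := st.g ++ [i.toString] }
  else
    { st with gs := st.gs ++ [st.g.reverse], bs := st.bs ++ [i.toString], g := [] }

def split_seq_components (seq : String) : List (List String) × List String × List String × List String :=
  let l := seq.toList
  let r := (PySem.List.enumerate l 0).foldl (pvAstep l) ⟨[], [], [], [], []⟩
  ((r.gs ++ [r.g.reverse]).reverse, r.bs.reverse, r.t, r.c)

-- ===== PORT B =====
def pvBstep (l : List Char) (ix : Nat) (st : PvSt) : PvSt :=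
  let i := l.getD ix ' '   -- exact: ix < l.length at every call site
  if i ∈ pvDigits then
    { st with gs := st.gs ++ [st.g], g := [], bs := st.bs ++ [i.toString] }
  else if i ∈ pvCT then { st with t := i.toString :: st.t }
  else if i ∈ pvNT then { st with c := i.toString :: st.c }
  else if i = 'X' then st
  else if i = '-' ∧ pvPrevDigit l ix then { st with bs := st.bs ++ [i.toString] }
  else { st with g := st.g ++ [i.toString] }

-- `for ix in range(len(seq) - 1, -1, -1)`: countdown recursion, index ix processed at step ix+1
def pvLoopB (l : List Char) : Nat → PvSt → PvSt
  | 0, st => st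
  | ix + 1, st => pvLoopB l ix (pvBstep l ix st)

def split_seq_components_alt (seq : String) : List (List String) × List String × List String × List String :=
  let l := seq.toList
  let r := pvLoopB l l.length ⟨[], [], [], [], []⟩
  (r.gs ++ [r.g], r.bs, r.t, r.c)

-- ===== PRECONDITION & SPEC =====
def Spec_split_seq_components (seq : String) (out : List (List String) × List String × List String × List String) : Prop := out = split_seq_components_alt seq
instance (seq : String) (out : List (List String) × List String × List String × List String) : Decidable (Spec_split_seq_components seq out) := by unfold Spec_split_seq_components; infer_instance

-- ===== CLAIM (what is proved, stated in full; the proofs are below) =====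
def Claim_equal_split_seq_components : Prop := ∀ (seq : String), Dom_split_seq_components seq → Spec_split_seq_components seq (split_seq_components seq)

-- ===== LEMMAS AND PROOFS =====

-- A's state after the first j characters (A is parameterised by the full list for seq[ix-1])
def pvAfold (l : List Char) (j : Nat) : PvSt :=
  (PySem.List.enumerate (l.take j) 0).foldl (pvAstep l) ⟨[], [], [], [], []⟩

lemma pvAfold_succ (l : List Char) (j : Nat) (hj : j < l.length) :
    pvAfold l (j + 1) = pvAstep l (pvAfold l j) ((j : Int), l[j]) := by
  unfold pvAfold
  rw [List.take_add_one, List.getElem?_eq_getElem hj, PySem.List.enumerate_append,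
    List.foldl_append]
  simp [PySem.List.enumerate_cons, PySem.List.enumerate_nil, Nat.min_eq_left (Nat.le_of_lt hj)]

-- The backward loop started at index j-1 from state st computes, joined with st, exactly
-- what A computes on the first j characters: gs/bs reversed, each pending group reversed,
-- t and c in forward order.
lemma pvKey (l : List Char) : ∀ (j : Nat), j ≤ l.length → ∀ (st : PvSt),
    (pvLoopB l j st).gs ++ [(pvLoopB l j st).g]
        = st.gs ++ ((st.g ++ (pvAfold l j).g.reverse) :: (pvAfold l j).gs.reverse)
    ∧ (pvLoopB l j st).bs = st.bs ++ (pvAfold l j).bs.reverse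
    ∧ (pvLoopB l j st).t = (pvAfold l j).t ++ st.t
    ∧ (pvLoopB l j st).c = (pvAfold l j).c ++ st.c := by
  intro j
  induction j with
  | zero => intro _ st; simp [pvLoopB, pvAfold, PySem.List.enumerate_nil]
  | succ j ih =>
    intro hle st
    have hj : j < l.length := Nat.lt_of_succ_le hle
    have hget : l[j]? = some l[j] := List.getElem?_eq_getElem hj
    have hunfold : pvLoopB l (j + 1) st = pvLoopB l j (pvBstep l j st) := rfl
    rw [hunfold, pvAfold_succ l j hj]
    by_cases hd : l[j] ∈ pvDigits
    · have hB : pvBstep l j st = ⟨[], st.gs ++ [st.g], st.bs ++ [String.singleton l[j]], st.t, st.c⟩ := by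
        simp [pvBstep, hget, hd]
      obtain ⟨k1, k2, k3, k4⟩ :=
        ih (Nat.le_of_lt hj) ⟨[], st.gs ++ [st.g], st.bs ++ [String.singleton l[j]], st.t, st.c⟩
      rw [hB]
      refine ⟨?_, ?_, ?_, ?_⟩ <;> simp [k1, k2, k3, k4, pvAstep, hd]
    · by_cases hct : l[j] ∈ pvCT
      · have hB : pvBstep l j st = ⟨st.g, st.gs, st.bs, String.singleton l[j] :: st.t, st.c⟩ := by
          simp [pvBstep, hget, hd, hct]
        obtain ⟨k1, k2, k3, k4⟩ :=
          ih (Nat.le_of_lt hj) ⟨st.g, st.gs, st.bs, String.singleton l[j] :: st.t, st.c⟩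
        rw [hB]
        refine ⟨?_, ?_, ?_, ?_⟩ <;> simp [k1, k2, k3, k4, pvAstep, hd, hct]
      · by_cases hnt : l[j] ∈ pvNT
        · have hB : pvBstep l j st = ⟨st.g, st.gs, st.bs, st.t, String.singleton l[j] :: st.c⟩ := by
            simp [pvBstep, hget, hd, hct, hnt]
          obtain ⟨k1, k2, k3, k4⟩ :=
            ih (Nat.le_of_lt hj) ⟨st.g, st.gs, st.bs, st.t, String.singleton l[j] :: st.c⟩
          rw [hB]
          refine ⟨?_, ?_, ?_, ?_⟩ <;> simp [k1, k2, k3, k4, pvAstep, hd, hct, hnt]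
        · by_cases hx : l[j] = 'X'
          · have hB : pvBstep l j st = st := by
              simp [pvBstep, hget, hd, hct, hnt, hx, pvDigits, pvCT, pvNT]
            obtain ⟨k1, k2, k3, k4⟩ := ih (Nat.le_of_lt hj) st
            rw [hB]
            refine ⟨?_, ?_, ?_, ?_⟩ <;> simp [k1, k2, k3, k4, pvAstep, hd, hct, hnt, hx, pvDigits, pvCT, pvNT]
          · by_cases hp : pvPrevDigit l ((j : Nat) : Int) = true
            · by_cases hm : l[j] = '-'
              · have hB : pvBstep l j st = ⟨st.g, st.gs, st.bs ++ [String.singleton '-'], st.t, st.c⟩ := by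
                  simp [pvBstep, hget, hd, hct, hnt, hx, hm, hp, pvDigits, pvCT, pvNT]
                obtain ⟨k1, k2, k3, k4⟩ :=
                  ih (Nat.le_of_lt hj) ⟨st.g, st.gs, st.bs ++ [String.singleton '-'], st.t, st.c⟩
                rw [hB]
                refine ⟨?_, ?_, ?_, ?_⟩ <;> simp [k1, k2, k3, k4, pvAstep, hd, hct, hnt, hx, hm, hp, pvDigits, pvCT, pvNT]
              · have hB : pvBstep l j st = ⟨st.g ++ [String.singleton l[j]], st.gs, st.bs, st.t, st.c⟩ := by
                  simp [pvBstep, hget, hd, hct, hnt, hx, hm]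
                obtain ⟨k1, k2, k3, k4⟩ :=
                  ih (Nat.le_of_lt hj) ⟨st.g ++ [String.singleton l[j]], st.gs, st.bs, st.t, st.c⟩
                rw [hB]
                refine ⟨?_, ?_, ?_, ?_⟩ <;> simp [k1, k2, k3, k4, pvAstep, hd, hct, hnt, hx, hm, hp]
            · have hB : pvBstep l j st = ⟨st.g ++ [String.singleton l[j]], st.gs, st.bs, st.t, st.c⟩ := by
                simp [pvBstep, hget, hd, hct, hnt, hx, hp]
              obtain ⟨k1, k2, k3, k4⟩ :=
                ih (Nat.le_of_lt hj) ⟨st.g ++ [String.singleton l[j]], st.gs, st.bs, st.t, st.c⟩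
              rw [hB]
              refine ⟨?_, ?_, ?_, ?_⟩ <;> simp [k1, k2, k3, k4, pvAstep, hd, hct, hnt, hx, hp]

-- ===== VERDICT (by name: the statement is the Claim_ definition above) =====
theorem split_seq_components_spec : Claim_equal_split_seq_components := by
  intro seq _
  unfold Spec_split_seq_components split_seq_components split_seq_components_alt
  have key := pvKey seq.toList seq.toList.length (le_refl _) ⟨[], [], [], [], []⟩
  have hfold : pvAfold seq.toList seq.toList.length
      = (PySem.List.enumerate seq.toList 0).foldl (pvAstep seq.toList) ⟨[], [], [], [], []⟩ := by
    unfold pvAfold; rw [List.take_length]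
  rw [hfold] at key
  obtain ⟨k1, k2, k3, k4⟩ := key
  simp only [String.length_toList] at k1 k2 k3 k4
  refine Prod.ext ?_ (Prod.ext ?_ (Prod.ext ?_ ?_)) <;>
    simp [k1, k2, k3, k4]
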